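-- pv_equiv track=rewrite | github.com/andrewmagill/matrix | politics_lab/politics_lab.py | bitter_rivals
-- ===== SOURCE A (Python) =====
-- def policy_compare(sen_a, sen_b, voting_dict):
--     """
--     Input: last names of sen_a and sen_b, and a voting dictionary mapping senator
--            names to lists representing their voting records.
--     Output: the dot-product (as a number) representing the degree of similarity
--             between two senators' voting policies
--     Example:
--         >>> voting_dict = {'Fox-Epstein':[-1,-1,-1,1],'Ravella':[1,1,1,1]}
--         >>> policy_compare('Fox-Epstein','Ravella', voting_dict)
--         -2
--     """
--     u = voting_dict[sen_a]
--     v = voting_dict[sen_b]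
--     return sum([u[i]*v[i] for i in range(len(u))])
--
-- def bitter_rivals(voting_dict):
--     """
--     Input: a dictionary mapping senator names to lists representing
--            their voting records
--     Output: a tuple containing the two senators who most strongly
--             disagree with one another.
--     Example:
--         >>> voting_dict = {'Klein': [-1,0,1], 'Fox-Epstein': [-1,-1,-1], 'Ravella': [0,0,1]}
--         >>> bitter_rivals(voting_dict)
--         ('Fox-Epstein', 'Ravella')
--     """
--     comp_dict = {}
--     senators = voting_dict.keys()
--     for sen_a in senators:
--       for sen_b in senators:
--         if sen_a != sen_b:
--           if (sen_b,sen_a) not in comp_dict: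
--             comp_dict[(sen_a,sen_b)] = policy_compare(sen_a, sen_b, voting_dict)
--
--     #this is ugly
--     comp_list = []
--     for key in comp_dict:
--       comp_list.append([key,comp_dict[key]])
--     sorted_comp_list = sorted(comp_list, key = lambda x: x[1])
--
--     return sorted_comp_list[0][0]
-- ===== SOURCE B (Python) =====
-- def bitter_rivals(voting_dict):
--     """Single pass over unordered senator pairs keeping the first running
--     minimum, instead of building a comparison dict and sorting it."""
--     best = None  # (score, (sen_a, sen_b))
--     rest = list(voting_dict)
--     while rest:
--         a = rest[0]
--         rest = rest[1:]
--         for b in rest: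
--             score = sum(x * y for x, y in zip(voting_dict[a], voting_dict[b]))
--             if best is None or score < best[0]:
--                 best = (score, (a, b))
--     return best[1]
-- ===== Notes on version B (the rewrite author's own statement) =====
-- stated objective: simpler
-- what changed: Drops the comparison dict (with its reverse-pair membership test), the list rebuild and the stable sort; B makes a single pass over unordered senator pairs in insertion order keeping the first strict running minimum (zip-based dot product), which returns the same first-minimal pair and skips half the pair evaluations and the sort.
-- outside the precondition, e.g. on bitter_rivals({}): A raises IndexError, B raises TypeError
import Mathlib
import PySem

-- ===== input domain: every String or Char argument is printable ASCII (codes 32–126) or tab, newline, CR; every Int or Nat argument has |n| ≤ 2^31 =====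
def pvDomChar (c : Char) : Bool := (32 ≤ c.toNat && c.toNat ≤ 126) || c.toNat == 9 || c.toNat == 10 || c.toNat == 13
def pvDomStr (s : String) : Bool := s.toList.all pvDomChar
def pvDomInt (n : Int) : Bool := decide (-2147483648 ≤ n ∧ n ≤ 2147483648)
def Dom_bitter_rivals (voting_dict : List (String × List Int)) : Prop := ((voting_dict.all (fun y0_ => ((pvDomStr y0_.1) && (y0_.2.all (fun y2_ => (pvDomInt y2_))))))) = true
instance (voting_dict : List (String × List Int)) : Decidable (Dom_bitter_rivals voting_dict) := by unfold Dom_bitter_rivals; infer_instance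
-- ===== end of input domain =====

-- B replaces A's comparison dict + list rebuild + stable sort by a single first-strict-minimum
-- pass over the unordered senator pairs in insertion order (objective: simpler).
-- The equivalence is about the RETURN value; neither program mutates its argument.

-- ===== PORT A =====
-- policy_compare(sen_a, sen_b, voting_dict); keys always come from the dict, so
-- voting_dict[sen] is d.getD sen [].  u[i] (i < len u) is in range; v[i] raises
-- IndexError in Python when v is shorter than u — those inputs are excluded by
-- Pre_bitter_rivals, so pyGetD's default 0 is never taken on admitted inputs.
def pvPolicyCompare (sen_a sen_b : String) (d : PySem.Dict String (List Int)) : Int :=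
  let u := d.getD sen_a []
  let v := d.getD sen_b []
  ((PySem.List.pyRange 0 u.length).map
    (fun i => PySem.List.pyGetD u i 0 * PySem.List.pyGetD v i 0)).sum

-- the body of A's inner `for sen_b in senators:` loop
def pvInner (d : PySem.Dict String (List Int)) (sen_a : String)
    (cd : PySem.Dict (String × String) Int) (sen_b : String) :
    PySem.Dict (String × String) Int :=
  if sen_a ≠ sen_b then
    if cd.contains (sen_b, sen_a) = false then
      cd.insert (sen_a, sen_b) (pvPolicyCompare sen_a sen_b d)
    else cd
  else cd

def bitter_rivals (voting_dict : List (String × List Int)) : String × String :=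
  let d := PySem.Dict.ofList voting_dict
  let senators := d.keys
  let comp_dict := senators.foldl (fun cd sen_a => senators.foldl (pvInner d sen_a) cd)
      PySem.Dict.empty
  let comp_list := comp_dict.items
  let sorted_comp_list := PySem.List.sorted comp_list (fun x => x.2)
  match PySem.List.pyGet? sorted_comp_list 0 with
  | some kv => kv.1
  | none => ("", "")   -- sorted_comp_list[0] raises IndexError in Python; excluded by Pre_

-- ===== PORT B =====
def pvDot (u v : List Int) : Int := ((u.zip v).map (fun p => p.1 * p.2)).sum

-- B's `while rest:` loop; state is `best`, Python's None ↦ none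
def pvBestLoop (d : PySem.Dict String (List Int)) :
    List String → Option (Int × (String × String)) → Option (Int × (String × String))
  | [], best => best
  | a :: rest, best =>
      pvBestLoop d rest (rest.foldl (fun best b =>
        let score := pvDot (d.getD a []) (d.getD b [])
        match best with
        | none => some (score, (a, b))
        | some (bs, p) => if score < bs then some (score, (a, b)) else some (bs, p)) best)

def bitter_rivals_alt (voting_dict : List (String × List Int)) : String × String :=
  let d := PySem.Dict.ofList voting_dict
  match pvBestLoop d d.keys none with
  | some (_, p) => p
  | none => ("", "")   -- best is None (fewer than two senators): best[1] raises in Python; excluded by Pre_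

-- ===== PRECONDITION & SPEC =====
-- Pre_ is exactly where Python A returns: with fewer than two senators
-- sorted_comp_list[0] raises IndexError, and if any later senator's record is
-- shorter than an earlier one's, policy_compare raises IndexError on v[i].
def Pre_bitter_rivals (voting_dict : List (String × List Int)) : Prop :=
  let d := PySem.Dict.ofList voting_dict
  2 ≤ d.keys.length ∧
    d.keys.Pairwise (fun a b => (d.getD a []).length ≤ (d.getD b []).length)
instance (voting_dict : List (String × List Int)) : Decidable (Pre_bitter_rivals voting_dict) := by
  unfold Pre_bitter_rivals; infer_instance
def pvWitness_bitter_rivals : (List (String × List Int)) :=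
  [("Klein", [-1, 0, 1]), ("Fox-Epstein", [-1, -1, -1]), ("Ravella", [0, 0, 1])]

def Spec_bitter_rivals (voting_dict : List (String × List Int)) (out : String × String) : Prop := out = bitter_rivals_alt voting_dict
instance (voting_dict : List (String × List Int)) (out : String × String) : Decidable (Spec_bitter_rivals voting_dict out) := by unfold Spec_bitter_rivals; infer_instance

-- ===== CLAIM (what is proved, stated in full; the proofs are below) =====
def Claim_equal_bitter_rivals : Prop := ∀ (voting_dict : List (String × List Int)), Dom_bitter_rivals voting_dict → Pre_bitter_rivals voting_dict → Spec_bitter_rivals voting_dict (bitter_rivals voting_dict)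
-- ===== LEMMAS AND PROOFS =====

-- the list of unordered pairs (earlier, later) in key order, with their scores
def pvPairs (f : String → String → Int) : List String → List ((String × String) × Int)
  | [] => []
  | a :: rest => rest.map (fun b => ((a, b), f a b)) ++ pvPairs f rest

-- pairs whose first component lies in `pre`, second component any later key of pre ++ rest
def pvPart (f : String → String → Int) : List String → List String → List ((String × String) × Int)
  | [], _ => []
  | a :: pre, rest => (pre ++ rest).map (fun b => ((a, b), f a b)) ++ pvPart f pre rest

theorem pvPart_nil (f : String → String → Int) (pre : List String) :
    pvPart f pre [] = pvPairs f pre := by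
  induction pre with
  | nil => rfl
  | cons a pre ih => simp [pvPart, pvPairs, ih]

theorem pvPart_append_singleton (f : String → String → Int) (pre : List String) (a : String)
    (rest : List String) :
    pvPart f (pre ++ [a]) rest =
      pvPart f pre (a :: rest) ++ rest.map (fun b => ((a, b), f a b)) := by
  induction pre with
  | nil => simp [pvPart]
  | cons x pre ih => simp [pvPart, ih]

theorem fst_mem_pvPart (f : String → String → Int) (pre rest : List String) (x y : String)
    (h : (x, y) ∈ (pvPart f pre rest).map Prod.fst) : x ∈ pre := by
  induction pre with
  | nil => simp [pvPart] at h
  | cons a pre ih =>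
      simp only [pvPart, List.map_append, List.mem_append] at h
      rcases h with h | h
      · simp only [List.map_map, List.mem_map, Function.comp] at h
        rcases h with ⟨b, _, heq⟩ | ⟨b, _, heq⟩ <;>
        · have hax : a = x := by
            have := congrArg Prod.fst heq
            simpa using this
          exact hax ▸ List.mem_cons_self
      · exact List.mem_cons_of_mem _ (ih h)

theorem mem_pvPart_keys (f : String → String → Int) (pre rest : List String) (b a : String)
    (hb : b ∈ pre) (ha : a ∈ rest) : (b, a) ∈ (pvPart f pre rest).map Prod.fst := by
  induction pre with
  | nil => simp at hb
  | cons x pre ih =>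
      simp only [pvPart, List.map_append, List.mem_append]
      rcases List.mem_cons.mp hb with rfl | hb
      · left
        simp only [List.map_map, List.mem_map, Function.comp]
        exact Or.inr ⟨a, ha, rfl⟩
      · right
        exact ih hb

-- membership of a key in an explicit item list, as contains
theorem contains_mk_iff (L : List ((String × String) × Int)) (k : String × String) :
    (PySem.Dict.mk L).contains k = true ↔ k ∈ L.map Prod.fst := by
  rw [PySem.Dict.contains_mk, List.any_eq_true]
  constructor
  · rintro ⟨p, hp, h⟩
    exact List.mem_map.mpr ⟨p, hp, beq_iff_eq.mp h⟩
  · intro h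
    obtain ⟨p, hp, hk⟩ := List.mem_map.mp h
    exact ⟨p, hp, beq_iff_eq.mpr hk⟩

-- phase 1 of the inner loop: keys before sen_a leave the dict unchanged
theorem foldl_inner_pre (d : PySem.Dict String (List Int)) (a : String) :
    ∀ (pre : List String) (L : List ((String × String) × Int)),
      (∀ b ∈ pre, (b, a) ∈ L.map Prod.fst) →
      pre.foldl (pvInner d a) (PySem.Dict.mk L) = PySem.Dict.mk L := by
  intro pre
  induction pre with
  | nil => intro L _; rfl
  | cons b pre ih =>
      intro L h
      have hstep : pvInner d a (PySem.Dict.mk L) b = PySem.Dict.mk L := by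
        unfold pvInner
        by_cases hab : a = b
        · simp [hab]
        · have : (PySem.Dict.mk L).contains (b, a) = true :=
            (contains_mk_iff L (b, a)).mpr (h b (by simp))
          simp [hab, this]
      simpa [List.foldl_cons, hstep] using ih L (fun b' hb' => h b' (by simp [hb']))

-- phase 3 of the inner loop: keys after sen_a each append a fresh pair
theorem foldl_inner_suf (d : PySem.Dict String (List Int)) (a : String) :
    ∀ (todo : List String) (L : List ((String × String) × Int)),
      todo.Nodup → a ∉ todo →
      (∀ y, (a, y) ∈ L.map Prod.fst → y ∉ todo) →
      (∀ x, x ∈ todo → (x, a) ∉ L.map Prod.fst) →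
      todo.foldl (pvInner d a) (PySem.Dict.mk L) =
        PySem.Dict.mk (L ++ todo.map (fun b => ((a, b), pvPolicyCompare a b d))) := by
  intro todo
  induction todo with
  | nil => intro L _ _ _ _; simp
  | cons b todo ih =>
      intro L hnd hna h1 h2
      have hab : a ≠ b := fun h => hna (h ▸ by simp)
      have hcb : (PySem.Dict.mk L).contains (b, a) = false := by
        rw [← Bool.not_eq_true, contains_mk_iff]
        exact h2 b (by simp)
      have hca : (PySem.Dict.mk L).contains (a, b) = false := by
        rw [← Bool.not_eq_true, contains_mk_iff]
        intro hmem
        exact (h1 b hmem) (by simp)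
      have hins : (PySem.Dict.mk L).insert (a, b) (pvPolicyCompare a b d) =
          PySem.Dict.mk (L ++ [((a, b), pvPolicyCompare a b d)]) := by
        have := PySem.Dict.items_insert_of_not_contains (PySem.Dict.mk L)
          (pvPolicyCompare a b d) hca
        exact PySem.Dict.ext this
      have hstep : pvInner d a (PySem.Dict.mk L) b =
          PySem.Dict.mk (L ++ [((a, b), pvPolicyCompare a b d)]) := by
        unfold pvInner
        simp [hab, hcb, hins]
      rw [List.foldl_cons, hstep,
        ih (L ++ [((a, b), pvPolicyCompare a b d)]) hnd.of_cons
          (fun h => hna (by simp [h]))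
          (by
            intro y hy
            simp only [List.map_append, List.mem_append, List.map_cons, List.map_nil,
              List.mem_singleton] at hy
            rcases hy with hy | hy
            · intro hmem; exact (h1 y hy) (by simp [hmem])
            · simp at hy
              subst hy
              exact (List.nodup_cons.mp hnd).1
          )
          (by
            intro x hx
            simp only [List.map_append, List.mem_append, List.map_cons, List.map_nil,
              List.mem_singleton]
            rintro (hm | hm)
            · exact h2 x (by simp [hx]) hm
            · simp at hm
              exact hna (hm.1 ▸ by simp [hx])
          )]
      simp

-- one full inner loop `for sen_b in senators:` for sen_a = a
theorem inner_total (d : PySem.Dict String (List Int)) (a : String)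
    (pre rest : List String) (hnd : (pre ++ a :: rest).Nodup) :
    (pre ++ a :: rest).foldl (pvInner d a)
        (PySem.Dict.mk (pvPart (fun x y => pvPolicyCompare x y d) pre (a :: rest))) =
      PySem.Dict.mk (pvPart (fun x y => pvPolicyCompare x y d) pre (a :: rest) ++
        rest.map (fun b => ((a, b), pvPolicyCompare a b d))) := by
  set f := fun x y => pvPolicyCompare x y d with hf
  have hna : a ∉ pre := by
    have := List.disjoint_of_nodup_append (by simpa using hnd)
    intro h; exact this h (by simp)
  have hnr : a ∉ rest := by
    have := (List.nodup_append.mp hnd).1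
    have h2 := (List.nodup_append.mp hnd).2.1
    exact (List.nodup_cons.mp h2).1
  have hdisj : ∀ x ∈ rest, x ∉ pre := by
    intro x hx hxp
    exact List.disjoint_of_nodup_append (by simpa using hnd) hxp (by simp [hx])
  rw [List.foldl_append,
    foldl_inner_pre d a pre _ (fun b hb => mem_pvPart_keys f pre (a :: rest) b a hb (by simp)),
    List.foldl_cons]
  have hself : pvInner d a (PySem.Dict.mk (pvPart f pre (a :: rest))) a =
      PySem.Dict.mk (pvPart f pre (a :: rest)) := by
    unfold pvInner; simp
  rw [hself]
  exact foldl_inner_suf d a rest _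
    ((List.nodup_cons.mp (List.nodup_append.mp hnd).2.1).2)
    hnr
    (fun y hy => absurd (fst_mem_pvPart f pre (a :: rest) a y hy) hna)
    (fun x hx hm => (hdisj x hx) (fst_mem_pvPart f pre (a :: rest) x a hm))

-- the whole nested loop builds exactly the combinations list
theorem outer_total (d : PySem.Dict String (List Int)) (ks : List String) :
    ∀ (rest pre : List String), ks = pre ++ rest → ks.Nodup →
      rest.foldl (fun cd a => ks.foldl (pvInner d a) cd)
          (PySem.Dict.mk (pvPart (fun x y => pvPolicyCompare x y d) pre rest)) =
        PySem.Dict.mk (pvPairs (fun x y => pvPolicyCompare x y d) ks) := by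
  intro rest
  induction rest with
  | nil =>
      intro pre hks _
      simp [pvPart_nil, hks]
  | cons a rest ih =>
      intro pre hks hnd
      rw [List.foldl_cons, hks, inner_total d a pre rest (hks ▸ hnd),
        ← pvPart_append_singleton, ← hks]
      exact ih (pre ++ [a]) (by simp [hks]) hnd

-- the first-strict-minimum step both results reduce to
def pvStep (o : Option ((String × String) × Int)) (x : (String × String) × Int) :
    Option ((String × String) × Int) :=
  match o with
  | none => some x
  | some m => if x.2 < m.2 then some x else some m

theorem head_insertBy (x : (String × String) × Int) (acc : List ((String × String) × Int)) :
    (PySem.List.insertBy (fun a b => decide (a.2 < b.2)) x acc).head? = pvStep acc.head? x := by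
  cases acc with
  | nil => simp [PySem.List.insertBy, pvStep]
  | cons m t =>
      by_cases h : x.2 < m.2
      · simp [PySem.List.insertBy, pvStep, h]
      · simp [PySem.List.insertBy, pvStep, h]

theorem head_foldl_insertBy :
    ∀ (L acc : List ((String × String) × Int)),
      (L.foldl (fun acc x => PySem.List.insertBy (fun a b => decide (a.2 < b.2)) x acc) acc).head? =
        L.foldl pvStep acc.head? := by
  intro L
  induction L with
  | nil => intro acc; rfl
  | cons x L ih =>
      intro acc
      rw [List.foldl_cons, List.foldl_cons, ih, head_insertBy]

-- head of the stable sort by score = first strict minimum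
theorem head_sorted_eq_foldl (L : List ((String × String) × Int)) :
    (PySem.List.sorted L (fun x => x.2)).head? = L.foldl pvStep none := by
  rw [PySem.List.sorted_eq_foldl_insertBy]
  exact head_foldl_insertBy L []

theorem pvPairs_congr (f g : String → String → Int) (r : String → String → Prop)
    (h : ∀ a b, r a b → f a b = g a b) :
    ∀ ks : List String, ks.Pairwise r → pvPairs f ks = pvPairs g ks := by
  intro ks
  induction ks with
  | nil => intro _; rfl
  | cons a rest ih =>
      intro hp
      have hhead := (List.pairwise_cons.mp hp).1
      have := (List.pairwise_cons.mp hp).2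
      simp only [pvPairs, ih this]
      congr 1
      exact List.map_congr_left (fun b hb => by rw [h a b (hhead b hb)])

-- A's truncated-range dot product = B's zip dot product when u is no longer than v
theorem sum_range_getD (u : List Int) :
    ∀ v : List Int, u.length ≤ v.length →
      ((List.range u.length).map (fun k => u.getD k 0 * v.getD k 0)).sum =
        ((u.zip v).map (fun p => p.1 * p.2)).sum := by
  induction u with
  | nil => intro v _; simp
  | cons x u ih =>
      intro v h
      cases v with
      | nil => simp at h
      | cons y v =>
          rw [List.length_cons, List.range_succ_eq_map, List.map_cons, List.map_map,
            List.sum_cons]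
          have heq : ((fun k : ℕ => (x :: u).getD k 0 * (y :: v).getD k 0) ∘ Nat.succ) =
              fun k : ℕ => u.getD k 0 * v.getD k 0 := by
            funext k; simp
          rw [heq, ih v (by simpa using h)]
          simp

theorem dot_range_eq_zip (u v : List Int) (h : u.length ≤ v.length) :
    ((PySem.List.pyRange 0 u.length).map
        (fun i => PySem.List.pyGetD u i 0 * PySem.List.pyGetD v i 0)).sum =
      ((u.zip v).map (fun p => p.1 * p.2)).sum := by
  rw [PySem.List.pyRange_zero_natCast, List.map_map]
  have heq : ((fun i => PySem.List.pyGetD u i 0 * PySem.List.pyGetD v i 0) ∘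
      (fun k : ℕ => (k : Int))) = fun k : ℕ => u.getD k 0 * v.getD k 0 := by
    funext k
    simp [PySem.List.pyGetD_natCast]
  rw [heq]
  exact sum_range_getD u v h

-- B's loop is the pvStep fold over the same pair list (state swapped)
theorem pvBestLoop_eq (d : PySem.Dict String (List Int)) :
    ∀ (ks : List String) (o : Option ((String × String) × Int)),
      pvBestLoop d ks (o.map Prod.swap) =
        ((pvPairs (fun a b => pvDot (d.getD a []) (d.getD b [])) ks).foldl pvStep o).map Prod.swap := by
  intro ks
  induction ks with
  | nil => intro o; rfl
  | cons a rest ih =>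
      intro o
      rw [pvBestLoop, pvPairs, List.foldl_append, List.foldl_map]
      have hstate : rest.foldl (fun best b =>
          let score := pvDot (d.getD a []) (d.getD b [])
          match best with
          | none => some (score, (a, b))
          | some (bs, p) => if score < bs then some (score, (a, b)) else some (bs, p))
          (o.map Prod.swap) =
          (rest.foldl (fun o b => pvStep o ((a, b), pvDot (d.getD a []) (d.getD b []))) o).map
            Prod.swap := by
        refine List.foldl_hom (Option.map Prod.swap) ?_
        intro x b
        cases x with
        | none => rfl
        | some m =>
            cases m with
            | mk p s =>
                simp only [Option.map_some, pvStep, Prod.swap]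
                split_ifs <;> rfl
      rw [hstate, ih]

-- xs[0] is the head
theorem pyGet?_zero (xs : List ((String × String) × Int)) : PySem.List.pyGet? xs 0 = xs.head? := by
  cases xs <;> simp [PySem.List.pyGet?, PySem.List.pyIdx?]

-- ===== VERDICT (by name: the statement is the Claim_ definition above) =====
theorem bitter_rivals_spec : Claim_equal_bitter_rivals := by
  intro voting_dict _ hpre
  obtain ⟨-, hpair⟩ := hpre
  have hnd : (PySem.Dict.ofList voting_dict).keys.Nodup :=
    PySem.Dict.nodup_keys_ofList voting_dict
  unfold Spec_bitter_rivals
  show (match PySem.List.pyGet? (PySem.List.sorted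
      ((List.foldl (fun cd sen_a => List.foldl (pvInner (PySem.Dict.ofList voting_dict) sen_a) cd
          (PySem.Dict.ofList voting_dict).keys)
        PySem.Dict.empty (PySem.Dict.ofList voting_dict).keys).items) (fun x => x.2)) 0 with
    | some kv => kv.1
    | none => ("", "")) =
    (match pvBestLoop (PySem.Dict.ofList voting_dict) (PySem.Dict.ofList voting_dict).keys none with
    | some (_, p) => p
    | none => ("", ""))
  have hcomp : List.foldl (fun cd sen_a => List.foldl (pvInner (PySem.Dict.ofList voting_dict) sen_a) cd
        (PySem.Dict.ofList voting_dict).keys) PySem.Dict.empty (PySem.Dict.ofList voting_dict).keys =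
      PySem.Dict.mk (pvPairs (fun x y => pvPolicyCompare x y (PySem.Dict.ofList voting_dict))
        (PySem.Dict.ofList voting_dict).keys) :=
    outer_total (PySem.Dict.ofList voting_dict) (PySem.Dict.ofList voting_dict).keys
      (PySem.Dict.ofList voting_dict).keys [] rfl hnd
  have hpairs : pvPairs (fun x y => pvPolicyCompare x y (PySem.Dict.ofList voting_dict))
        (PySem.Dict.ofList voting_dict).keys =
      pvPairs (fun a b => pvDot ((PySem.Dict.ofList voting_dict).getD a [])
        ((PySem.Dict.ofList voting_dict).getD b [])) (PySem.Dict.ofList voting_dict).keys := by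
    refine pvPairs_congr _ _
      (fun a b => ((PySem.Dict.ofList voting_dict).getD a []).length ≤
        ((PySem.Dict.ofList voting_dict).getD b []).length) ?_ _ hpair
    intro a b hlen
    unfold pvPolicyCompare pvDot
    exact dot_range_eq_zip _ _ hlen
  have hB := pvBestLoop_eq (PySem.Dict.ofList voting_dict) (PySem.Dict.ofList voting_dict).keys none
  simp only [Option.map_none] at hB
  rw [hcomp, hB, PySem.Dict.items, pyGet?_zero, head_sorted_eq_foldl, hpairs]
  cases (pvPairs (fun a b => pvDot ((PySem.Dict.ofList voting_dict).getD a [])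
      ((PySem.Dict.ofList voting_dict).getD b [])) (PySem.Dict.ofList voting_dict).keys).foldl
      pvStep none with
  | none => rfl
  | some m => cases m with | mk p s => rfl
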